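-- pv_equiv track=rewrite | github.com/l1-ca0/EPI_Python_Illustrated | Heap/k_largest_in_binary_heap.py | k_largest_in_binary_heap
-- ===== SOURCE A (Python) =====
-- import heapq
-- from typing import List
--
-- def k_largest_in_binary_heap(A: List[int], k: int) -> List[int]:
--     """
--     Finds the k largest elements in a max-heap represented by an array.
--
--     Args:
--         A: A list representing a max-heap.
--         k: The number of largest elements to find.
--
--     Returns:
--         A list containing the k largest elements.
--     """
--     if k <= 0:
--         return []
--
--     # Our "candidate heap" will store tuples of (-value, index).
--     # We use -value to simulate a max-heap with heapq (a min-heap).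
--     # The index is the element's position in the input array A.
--     candidate_max_heap = []
--     result = []
--
--     # Start with the largest element, which is the root of the input heap.
--     # We store its negated value and its index (0).
--     heapq.heappush(candidate_max_heap, (-A[0], 0))
--
--     # Loop k times to extract the k largest elements.
--     for _ in range(k):
--         # If the candidate heap is empty, we've extracted all possible elements.
--         if not candidate_max_heap:
--             break
--
--         # Get the next largest element and its index from our candidate heap.
--         neg_value, index = heapq.heappop(candidate_max_heap)
--
--         # Add the actual value (not negated) to our result list.
--         result.append(-neg_value)
--
--         # Add the children of the popped element as new candidates.
--         # Left child is at index 2*i + 1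
--         left_child_idx = 2 * index + 1
--         if left_child_idx < len(A):
--             heapq.heappush(candidate_max_heap, (-A[left_child_idx], left_child_idx))
--
--         # Right child is at index 2*i + 2
--         right_child_idx = 2 * index + 2
--         if right_child_idx < len(A):
--             heapq.heappush(candidate_max_heap, (-A[right_child_idx], right_child_idx))
--
--     return result
-- ===== SOURCE B (Python) =====
-- def k_largest_in_binary_heap(A, k):
--     """k largest elements of a max-heap array: candidate frontier kept as a
--     plain list of INDICES; each round the winning value is the max over the
--     candidates' values and the winner the smallest index attaining it, which
--     is then removed by value -- instead of A's heapq of (-value, index) pairs."""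
--     if k <= 0:
--         return []
--     n = len(A)
--     cand = [0]
--     out = []
--     r = k
--     while r > 0 and cand:
--         m = max(map(A.__getitem__, cand))
--         best = min(i for i in cand if A[i] == m)
--         cand.remove(best)
--         left = 2 * best + 1
--         if left < n:
--             cand.append(left)
--         right = 2 * best + 2
--         if right < n:
--             cand.append(right)
--         out.append(A[best])
--         r -= 1
--     return out
-- ===== Notes on version B (the rewrite author's own statement) =====
-- stated objective: alternative
-- what changed: A's heapq priority queue of (-value, index) pairs is replaced by a plain list of candidate indices: each round the maximum candidate value is found by one pass over the values and the smallest index attaining it by a second pass, and that index is removed by value; values live in A and are looked up, not stored in a queue.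
import Mathlib
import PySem

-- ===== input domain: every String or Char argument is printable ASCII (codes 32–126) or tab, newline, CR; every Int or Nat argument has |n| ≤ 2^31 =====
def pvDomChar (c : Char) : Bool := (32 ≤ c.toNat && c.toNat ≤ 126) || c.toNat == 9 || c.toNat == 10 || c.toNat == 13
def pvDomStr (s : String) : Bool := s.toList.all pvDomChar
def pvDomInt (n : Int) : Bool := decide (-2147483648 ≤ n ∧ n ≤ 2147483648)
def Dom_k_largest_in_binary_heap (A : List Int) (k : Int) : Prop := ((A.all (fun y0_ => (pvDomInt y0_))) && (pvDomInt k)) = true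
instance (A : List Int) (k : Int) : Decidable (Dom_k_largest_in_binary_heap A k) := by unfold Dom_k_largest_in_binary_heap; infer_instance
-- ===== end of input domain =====

-- B replaces A's heapq priority queue of (-value, index) pairs by a plain list of
-- candidate indices, selecting each round's winner with max under the key (A[i], -i)
-- and removing it by value (objective: alternative).

-- ===== PORT A =====
-- heapq.heappush/heappop on tuples ported at the priority-queue contract level: the
-- pop sequence of heapq equals that of a list kept sorted ascending by the
-- lexicographic tuple order; push = sorted insert, pop = head. Exact for the
-- observable (pop-sequence) behaviour of A's heap.
def pvHpush (h : List (Int × Int)) (x : Int × Int) : List (Int × Int) :=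
  match h with
  | [] => [x]
  | y :: t => if x.1 < y.1 ∨ (x.1 = y.1 ∧ x.2 ≤ y.2) then x :: y :: t else y :: pvHpush t x

def pvALoop (A : List Int) : Nat → List (Int × Int) → List Int → List Int
  | 0, _, res => res
  | n + 1, h, res =>
    match h with
    | [] => res
    | (nv, i) :: rest =>
      let res' := res ++ [-nv]
      let l := 2 * i + 1
      let h1 := if l < (A.length : Int) then pvHpush rest (-((PySem.List.pyGet? A l).getD 0), l) else rest
      let r := 2 * i + 2
      let h2 := if r < (A.length : Int) then pvHpush h1 (-((PySem.List.pyGet? A r).getD 0), r) else h1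
      pvALoop A n h2 res'

def k_largest_in_binary_heap (A : List Int) (k : Int) : List Int :=
  if k ≤ 0 then []
  else pvALoop A k.toNat (pvHpush [] (-((PySem.List.pyGet? A 0).getD 0), 0)) []

-- ===== PORT B =====
-- A[i] for a candidate index i (in-range whenever the Python runs without IndexError)
def pvVal (A : List Int) (i : Int) : Int := (PySem.List.pyGet? A i).getD 0

-- the while loop: fuel r, candidate index list, output accumulator;
-- max(map(A.__getitem__, cand)) = max?, min(i for i in cand if A[i] == m) = min? of
-- the filtered list, cand.remove(best) = remove? (the none arms are the loop exit /
-- an unreachable empty-selection guard, not an algorithm switch)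
def pvBLoop (A : List Int) : Nat → List Int → List Int → List Int
  | 0, _, out => out
  | r + 1, cand, out =>
    match PySem.List.max? (cand.map (pvVal A)) (fun v => v) with
    | none => out
    | some m =>
      match PySem.List.min? (cand.filter (fun i => pvVal A i == m)) (fun i => i) with
      | none => out
      | some best =>
        let cand1 := (PySem.List.remove? cand best).getD cand
        let cand2 := if 2 * best + 1 < (A.length : Int) then cand1 ++ [2 * best + 1] else cand1
        let cand3 := if 2 * best + 2 < (A.length : Int) then cand2 ++ [2 * best + 2] else cand2
        pvBLoop A r cand3 (out ++ [pvVal A best])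

def k_largest_in_binary_heap_alt (A : List Int) (k : Int) : List Int :=
  if k ≤ 0 then [] else pvBLoop A k.toNat [0] []

-- ===== PRECONDITION & SPEC =====
-- Pre_ excludes only A = [] with k > 0, where the Python A raises IndexError on A[0] (B raises too).
def Pre_k_largest_in_binary_heap (A : List Int) (k : Int) : Prop := k ≤ 0 ∨ A ≠ []
instance (A : List Int) (k : Int) : Decidable (Pre_k_largest_in_binary_heap A k) := by
  unfold Pre_k_largest_in_binary_heap; infer_instance

def pvWitness_k_largest_in_binary_heap : List Int × Int := ([10, 7, 5, 3, 2], 3)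

def Spec_k_largest_in_binary_heap (A : List Int) (k : Int) (out : List Int) : Prop := out = k_largest_in_binary_heap_alt A k
instance (A : List Int) (k : Int) (out : List Int) : Decidable (Spec_k_largest_in_binary_heap A k out) := by unfold Spec_k_largest_in_binary_heap; infer_instance

-- ===== CLAIM (what is proved, stated in full; the proofs are below) =====
def Claim_equal_k_largest_in_binary_heap : Prop := ∀ (A : List Int) (k : Int), Dom_k_largest_in_binary_heap A k → Pre_k_largest_in_binary_heap A k → Spec_k_largest_in_binary_heap A k (k_largest_in_binary_heap A k)

-- ===== LEMMAS AND PROOFS =====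

-- the lexicographic order heapq uses on the stored (-value, index) tuples
def pvLexLe (a b : Int × Int) : Prop := a.1 < b.1 ∨ (a.1 = b.1 ∧ a.2 ≤ b.2)

-- B's candidate index i corresponds to A's stored tuple (-A[i], i)
def pvF (A : List Int) (i : Int) : Int × Int := (-(pvVal A i), i)

theorem pvF_inj (A : List Int) : Function.Injective (pvF A) := by
  intro a b h
  simpa [pvF] using congrArg Prod.snd h

theorem pvLexLe_refl (a : Int × Int) : pvLexLe a a := by
  simp [pvLexLe]

theorem pvLexLe_trans {a b c : Int × Int} (h1 : pvLexLe a b) (h2 : pvLexLe b c) : pvLexLe a c := by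
  obtain ⟨a1, a2⟩ := a; obtain ⟨b1, b2⟩ := b; obtain ⟨c1, c2⟩ := c
  simp only [pvLexLe] at *; omega

theorem pvHpush_perm (h : List (Int × Int)) (x : Int × Int) : (pvHpush h x).Perm (x :: h) := by
  induction h with
  | nil => simp [pvHpush]
  | cons y t ih =>
    by_cases hc : x.1 < y.1 ∨ (x.1 = y.1 ∧ x.2 ≤ y.2)
    · simp [pvHpush, hc]
    · simp only [pvHpush, if_neg hc]
      exact (ih.cons y).trans (List.Perm.swap x y t)

theorem pvHpush_sorted {h : List (Int × Int)} (x : Int × Int) (hs : h.Pairwise pvLexLe) :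
    (pvHpush h x).Pairwise pvLexLe := by
  induction h with
  | nil => simp [pvHpush]
  | cons y t ih =>
    rcases List.pairwise_cons.1 hs with ⟨hy, ht⟩
    by_cases hc : x.1 < y.1 ∨ (x.1 = y.1 ∧ x.2 ≤ y.2)
    · simp only [pvHpush, if_pos hc]
      refine List.pairwise_cons.2 ⟨?_, hs⟩
      intro z hz
      rcases List.mem_cons.1 hz with hzy | hz'
      · rw [hzy]; exact hc
      · exact pvLexLe_trans (show pvLexLe x y from hc) (hy z hz')
    · simp only [pvHpush, if_neg hc]
      refine List.pairwise_cons.2 ⟨?_, ih ht⟩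
      intro z hz
      have hz' := (pvHpush_perm t x).mem_iff.1 hz
      rcases List.mem_cons.1 hz' with hzx | hz''
      · rw [hzx]
        obtain ⟨x1, x2⟩ := x; obtain ⟨y1, y2⟩ := y
        simp only [pvLexLe] at *; omega
      · exact hy z hz''

-- under the invariant, B's two-pass winner is exactly the index of A's sorted head
theorem pvBest_eq_head (A : List Int) (nv j : Int) (rest : List (Int × Int))
    (cand : List Int)
    (hs : ((nv, j) :: rest).Pairwise pvLexLe)
    (hp : (cand.map (pvF A)).Perm ((nv, j) :: rest))
    {m best : Int}
    (hm : PySem.List.max? (cand.map (pvVal A)) (fun v => v) = some m)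
    (hb : PySem.List.min? (cand.filter (fun i => pvVal A i == m)) (fun i => i) = some best) :
    best = j ∧ pvVal A j = -nv := by
  have hjm : (nv, j) ∈ cand.map (pvF A) := hp.mem_iff.2 (List.mem_cons.2 (Or.inl rfl))
  rcases List.mem_map.1 hjm with ⟨i, hi, hie⟩
  have hij : i = j := congrArg Prod.snd hie
  subst hij
  have hval : -(pvVal A i) = nv := congrArg Prod.fst hie
  -- the head is lex-minimal among all stored tuples
  have hmin : ∀ y ∈ cand, pvLexLe (nv, i) (pvF A y) := by
    intro y hy
    have hmm : pvF A y ∈ (nv, i) :: rest := hp.mem_iff.1 (List.mem_map.2 ⟨y, hy, rfl⟩)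
    rcases List.mem_cons.1 hmm with h | h
    · rw [h]; exact pvLexLe_refl _
    · exact (List.pairwise_cons.1 hs).1 _ h
  -- hence pvVal A i is the maximal candidate value, so m = pvVal A i
  have hmax := PySem.List.max?_isMax hm
  have hmem := PySem.List.max?_mem hm
  rcases List.mem_map.1 hmem with ⟨y0, hy0, hy0e⟩
  have h1 : m ≤ pvVal A i := by
    have := hmin y0 hy0
    simp only [pvLexLe, pvF] at this
    omega
  have h2 : pvVal A i ≤ m := hmax _ (List.mem_map.2 ⟨i, hi, rfl⟩)
  have hmi : m = pvVal A i := le_antisymm h1 h2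
  -- i is in the filtered list, so best ≤ i
  have hif : i ∈ cand.filter (fun i => pvVal A i == m) := by
    refine List.mem_filter.2 ⟨hi, ?_⟩
    simp [hmi]
  have hble : best ≤ i := PySem.List.min?_isMin hb i hif
  -- best is a candidate with value m, so the head's minimality gives i ≤ best
  have hbf := PySem.List.min?_mem hb
  rcases List.mem_filter.1 hbf with ⟨hbc, hbv⟩
  have hbv' : pvVal A best = m := by simpa using hbv
  have h3 := hmin best hbc
  simp only [pvLexLe, pvF] at h3
  constructor
  · omega
  · omega

-- appending a child index on B's side matches pvHpush of its tuple on A's side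
theorem pvPush_perm_step (A : List Int) (cand : List Int) (rest : List (Int × Int)) (li : Int)
    (h : (cand.map (pvF A)).Perm rest) :
    ((cand ++ [li]).map (pvF A)).Perm (pvHpush rest (-((PySem.List.pyGet? A li).getD 0), li)) := by
  rw [List.map_append]
  refine (List.perm_append_singleton _ _).trans ?_
  refine List.Perm.trans ?_ (pvHpush_perm rest _).symm
  exact (h.cons (pvF A li))

theorem pvLoop_eq (A : List Int) (n : Nat) (h : List (Int × Int)) (cand : List Int) (res : List Int)
    (hs : h.Pairwise pvLexLe) (hp : (cand.map (pvF A)).Perm h) :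
    pvALoop A n h res = pvBLoop A n cand res := by
  induction n generalizing h cand res with
  | zero => rfl
  | succ n ih =>
    match h, hs, hp with
    | [], _, hp =>
      have : cand = [] := by
        have := hp.eq_nil
        cases cand with
        | nil => rfl
        | cons a b => simp at this
      subst this; rfl
    | (nv, j) :: rest, hs, hp =>
      match cand, hp with
      | [], hp => exact absurd hp.symm.eq_nil (by simp)
      | c :: t, hp =>
        have hms : ∃ m, PySem.List.max? ((c :: t).map (pvVal A)) (fun v => v) = some m := by
          cases hmx : PySem.List.max? ((c :: t).map (pvVal A)) (fun v => v) with
          | none => exact absurd ((PySem.List.max?_eq_none_iff _ _).1 hmx) (by simp)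
          | some m => exact ⟨m, rfl⟩
        obtain ⟨m, hme⟩ := hms
        have hbs : ∃ best, PySem.List.min? ((c :: t).filter (fun i => pvVal A i == m)) (fun i => i) = some best := by
          cases hmn : PySem.List.min? ((c :: t).filter (fun i => pvVal A i == m)) (fun i => i) with
          | none =>
            have hnil := (PySem.List.min?_eq_none_iff _ _).1 hmn
            rcases List.mem_map.1 (PySem.List.max?_mem hme) with ⟨y0, hy0, hy0e⟩
            have : y0 ∈ (c :: t).filter (fun i => pvVal A i == m) :=
              List.mem_filter.2 ⟨hy0, by simp [hy0e]⟩
            rw [hnil] at this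
            simp at this
          | some b => exact ⟨b, rfl⟩
        obtain ⟨best, hbe⟩ := hbs
        obtain ⟨hmj, hvj⟩ := pvBest_eq_head A nv j rest (c :: t) hs hp hme hbe
        subst hmj
        have hmem : best ∈ c :: t :=
          (List.mem_filter.1 (PySem.List.min?_mem hbe)).1
        have hrm : PySem.List.remove? (c :: t) best = some ((c :: t).erase best) :=
          PySem.List.remove?_eq_some_erase _ best hmem
        simp only [pvALoop, pvBLoop, hme, hbe, hrm, Option.getD_some]
        have hrest : rest.Pairwise pvLexLe := (List.pairwise_cons.1 hs).2
        have herase : (((c :: t).erase best).map (pvF A)).Perm rest := by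
          have hhead : pvF A best = (nv, best) := by simp [pvF, hvj]
          have h1 : (((c :: t).erase best).map (pvF A)) = ((c :: t).map (pvF A)).erase (pvF A best) :=
            List.map_erase (pvF_inj A) (c :: t)
          rw [h1, hhead]

          simpa [List.erase_cons_head] using hp.erase (nv, best)
        have hout : -nv = pvVal A best := by omega
        rw [hout]
        by_cases hcl : 2 * best + 1 < (A.length : Int)
        · by_cases hcr : 2 * best + 2 < (A.length : Int)
          · simp only [if_pos hcl, if_pos hcr]
            exact ih _ _ _ (pvHpush_sorted _ (pvHpush_sorted _ hrest))
              (pvPush_perm_step A _ _ _ (pvPush_perm_step A _ _ _ herase))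
          · simp only [if_pos hcl, if_neg hcr]
            exact ih _ _ _ (pvHpush_sorted _ hrest) (pvPush_perm_step A _ _ _ herase)
        · by_cases hcr : 2 * best + 2 < (A.length : Int)
          · simp only [if_neg hcl, if_pos hcr]
            exact ih _ _ _ (pvHpush_sorted _ hrest) (pvPush_perm_step A _ _ _ herase)
          · simp only [if_neg hcl, if_neg hcr]
            exact ih _ _ _ hrest herase

-- ===== VERDICT (by name: the statement is the Claim_ definition above) =====
theorem k_largest_in_binary_heap_spec : Claim_equal_k_largest_in_binary_heap := by
  intro A k _ _
  unfold Spec_k_largest_in_binary_heap k_largest_in_binary_heap k_largest_in_binary_heap_alt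
  by_cases hk : k ≤ 0
  · simp [hk]
  · simp only [if_neg hk]
    exact pvLoop_eq A k.toNat (pvHpush [] (-((PySem.List.pyGet? A 0).getD 0), 0)) [0] []
      (by unfold pvHpush; simp) (by unfold pvHpush pvF pvVal; simp)
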